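-- pv_equiv track=rewrite | github.com/Narges1989/PythonProjects | src/py104/task14.py | task14
-- ===== SOURCE A (Python) =====
-- def task14(sells: list[int]) -> str:
--     Min = sells[0]
--     week_day = ['Monday','Tuesday','Wednesday','Thursday','Friday','Saturday','Sunday']
--     Week_day_min = week_day[0]
--     for index,sell in enumerate(sells):
--         if sell<Min:
--             Min = sell
--             Week_day_min = week_day[index]
--     return Week_day_min
-- ===== SOURCE B (Python) =====
-- def task14(sells: list[int]) -> str:
--     week_day = ['Monday','Tuesday','Wednesday','Thursday','Friday','Saturday','Sunday']
--     return week_day[sells.index(min(sells))]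
-- ===== Notes on version B (the rewrite author's own statement) =====
-- stated objective: idiomatic
-- what changed: Replaces the manual running-minimum loop over enumerate with min() plus list.index(), reading the weekday off the first-minimum position directly.
import Mathlib
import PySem

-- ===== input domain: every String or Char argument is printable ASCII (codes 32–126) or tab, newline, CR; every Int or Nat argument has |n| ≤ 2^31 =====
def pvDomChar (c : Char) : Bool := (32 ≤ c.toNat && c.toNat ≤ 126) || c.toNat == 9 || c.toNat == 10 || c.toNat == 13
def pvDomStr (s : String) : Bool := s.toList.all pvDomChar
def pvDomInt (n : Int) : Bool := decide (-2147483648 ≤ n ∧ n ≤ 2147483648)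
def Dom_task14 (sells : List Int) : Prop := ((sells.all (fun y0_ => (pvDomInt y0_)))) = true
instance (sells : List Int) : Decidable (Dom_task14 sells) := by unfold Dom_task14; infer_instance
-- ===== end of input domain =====

-- B trades A's manual running-minimum loop for min() + index(); return values agree on Pre_ (both raise elsewhere).

-- the shared weekday table
def pvWeek : List String := ["Monday","Tuesday","Wednesday","Thursday","Friday","Saturday","Sunday"]

-- ===== PORT A =====
-- literal port of A's loop; week_day[index] raises outside 0..6, modelled as (pyGet? …).getD "" — Pre_ excludes those inputs
def task14 (sells : List Int) : String :=
  let min0 : Int := (PySem.List.pyGet? sells 0).getD 0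
  ((PySem.List.enumerate sells).foldl
    (fun (st : Int × String) (p : Int × Int) =>
      if p.2 < st.1 then (p.2, (PySem.List.pyGet? pvWeek p.1).getD "") else st)
    (min0, "Monday")).2

-- ===== PORT B =====
-- literal port of B: week_day[sells.index(min(sells))]; min()/index/[] raise on the inputs Pre_ excludes, modelled as none/.getD ""
def task14_alt (sells : List Int) : String :=
  match PySem.List.min? sells (fun x => x) with
  | none => ""
  | some m =>
    match PySem.List.index? sells m with
    | none => ""
    | some i => (PySem.List.pyGet? pvWeek (i : Int)).getD ""

-- ===== PRECONDITION & SPEC =====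
-- Pre_ excludes exactly the inputs where Python A raises IndexError: the empty list, and lists whose
-- first-minimum position is ≥ 7 (so week_day[index] is out of range); A returns on nothing excluded here.
def Pre_task14 (sells : List Int) : Prop :=
  sells ≠ [] ∧ PySem.List.min? (sells.take 7) (fun x => x) = PySem.List.min? sells (fun x => x)
instance (sells : List Int) : Decidable (Pre_task14 sells) := by unfold Pre_task14; infer_instance
def pvWitness_task14 : List Int := [3, 1, 2]

def Spec_task14 (sells : List Int) (out : String) : Prop := out = task14_alt sells
instance (sells : List Int) (out : String) : Decidable (Spec_task14 sells out) := by unfold Spec_task14; infer_instance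

-- ===== CLAIM (what is proved, stated in full; the proofs are below) =====
def Claim_equal_task14 : Prop := ∀ (sells : List Int), Dom_task14 sells → Pre_task14 sells → Spec_task14 sells (task14 sells)

-- ===== LEMMAS AND PROOFS =====

-- first minimum of a list together with its first index, built back-to-front (proof-side helper)
def pvFm : List Int → Option (Int × Nat)
  | [] => none
  | a :: t =>
    match pvFm t with
    | none => some (a, 0)
    | some (v, i) => if v < a then some (v, i + 1) else some (a, 0)

lemma pvFm_fold (l : List Int) (k m : Int) (d : String) :
    (PySem.List.enumerate l k).foldl
      (fun (st : Int × String) (p : Int × Int) =>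
        if p.2 < st.1 then (p.2, (PySem.List.pyGet? pvWeek p.1).getD "") else st)
      (m, d)
    = match pvFm l with
      | none => (m, d)
      | some (v, i) => if v < m then (v, (PySem.List.pyGet? pvWeek (k + i)).getD "") else (m, d) := by
  induction l generalizing k m d with
  | nil => simp [pvFm, PySem.List.enumerate_nil]
  | cons a t ih =>
    rw [PySem.List.enumerate_cons, List.foldl_cons]
    by_cases ha : a < m
    · simp only [ha, if_pos]
      rw [ih]
      cases hft : pvFm t with
      | none =>
        simp [pvFm, hft, ha]
      | some p =>
        obtain ⟨v, i⟩ := p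
        by_cases hv : v < a
        · have hlt : v < m := lt_trans hv ha
          have hk : k + 1 + (i : Int) = k + ((i + 1 : Nat) : Int) := by push_cast; ring
          simp [pvFm, hft, hv, hlt, hk]
        · simp [pvFm, hft, hv, ha]
    · simp only [ha, if_false]
      rw [ih]
      cases hft : pvFm t with
      | none => simp [pvFm, hft, ha]
      | some p =>
        obtain ⟨v, i⟩ := p
        by_cases hv : v < a
        · by_cases hvm : v < m
          · have hk : k + 1 + (i : Int) = k + ((i + 1 : Nat) : Int) := by push_cast; ring
            simp [pvFm, hft, hv, hvm, hk]
          · simp [pvFm, hft, hv, hvm]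
        · have hvm : ¬ v < m := by omega
          simp [pvFm, hft, hv, hvm, ha]

lemma pvFm_spec (a : Int) (t : List Int) :
    ∃ v i, pvFm (a :: t) = some (v, i) ∧ v = t.foldl min a ∧
      PySem.List.index? (a :: t) v = some i := by
  induction t generalizing a with
  | nil =>
    exact ⟨a, 0, by simp [pvFm], by simp, by rw [PySem.List.index?_cons_self]⟩
  | cons b t' ih =>
    obtain ⟨v', i', hfm, hval, hidx⟩ := ih b
    by_cases hv : v' < a
    · refine ⟨v', i' + 1, ?_, ?_, ?_⟩
      · rw [pvFm, hfm]; simp [hv]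
      · have := List.foldl_assoc (op := min) (l := t') (a₁ := a) (a₂ := b)
        rw [List.foldl_cons, this, ← hval]
        omega
      · rw [PySem.List.index?_cons_of_ne (b :: t') (show a ≠ v' by omega), hidx]
        rfl
    · refine ⟨a, 0, ?_, ?_, ?_⟩
      · rw [pvFm, hfm]; simp [hv]
      · have := List.foldl_assoc (op := min) (l := t') (a₁ := a) (a₂ := b)
        rw [List.foldl_cons, this, ← hval]
        omega
      · rw [PySem.List.index?_cons_self]

lemma pvFm_head (a : Int) (t : List Int) (v : Int) (i : Nat)
    (h : pvFm (a :: t) = some (v, i)) (hge : ¬ v < a) : v = a ∧ i = 0 := by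
  unfold pvFm at h
  cases hft : pvFm t with
  | none => rw [hft] at h; simp at h; exact ⟨h.1.symm, h.2.symm⟩
  | some p =>
    obtain ⟨v', i'⟩ := p
    rw [hft] at h
    by_cases hv : v' < a
    · simp [hv] at h; omega
    · simp [hv] at h; exact ⟨h.1.symm, h.2.symm⟩

-- ===== VERDICT (by name: the statement is the Claim_ definition above) =====
theorem task14_spec : Claim_equal_task14 := by
  intro sells _dom hpre
  obtain ⟨hne, -⟩ := hpre
  unfold Spec_task14
  cases sells with
  | nil => exact absurd rfl hne
  | cons a t =>
    obtain ⟨v, i, hfm, hval, hidx⟩ := pvFm_spec a t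
    have hB : task14_alt (a :: t) = (PySem.List.pyGet? pvWeek (i : Int)).getD "" := by
      unfold task14_alt
      rw [PySem.List.min?_id_cons, ← hval]
      simp only [hidx]
    have hA : task14 (a :: t)
        = (match pvFm (a :: t) with
           | none => ((a : Int), "Monday")
           | some (v, i) =>
             if v < a then (v, (PySem.List.pyGet? pvWeek ((0 : Int) + i)).getD "")
             else ((a : Int), "Monday")).2 := by
      unfold task14
      simp only [PySem.List.pyGet?_zero_cons, Option.getD_some]
      rw [pvFm_fold]
    rw [hA, hfm, hB]
    by_cases hv : v < a
    · simp [hv]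
    · obtain ⟨hva, hi0⟩ := pvFm_head a t v i hfm hv
      subst hi0
      simp [hv]
      rfl
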